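-- pv_equiv track=rewrite | github.com/blocksrey/jml | jml.py | convert_inline_jml_to_long_form
-- ===== SOURCE A (Python) =====
-- def convert_inline_jml_to_long_form(inline_jml):
-- 	lines = inline_jml.split('\n')
-- 	long_form_jml = ''
-- 	stack = []
--
-- 	for line in lines:
-- 		for tag in line.split(' '):
-- 			if tag.startswith('@'):
-- 				if stack:
-- 					long_form_jml += '\t' * len(stack[:-1]) + ' '.join(stack[-1]) + '\n'
-- 					stack[-1] = []
-- 				stack.append([tag])
-- 			elif tag != '':
-- 				stack[-1].append(tag)
--
-- 	while stack:
-- 		long_form_jml += '\t' * (len(stack) - 1) + ' '.join(stack.pop()) + '\n'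
--
-- 	return long_form_jml
-- ===== SOURCE B (Python) =====
-- def convert_inline_jml_to_long_form(inline_jml):
-- 	# Phase 1: parse the token stream into a list of tag-groups.
-- 	tokens = [t for line in inline_jml.split('\n') for t in line.split(' ') if t != '']
-- 	groups = []
-- 	for t in tokens:
-- 		if t.startswith('@'):
-- 			groups.append([t])
-- 		else:
-- 			groups[-1].append(t)
-- 	# Phase 2: format: group i at indent i, then the trailing blank indented lines.
-- 	parts = ['\t'*i + ' '.join(g) + '\n' for i, g in enumerate(groups)]
-- 	parts += ['\t'*i + '\n' for i in reversed(range(len(groups) - 1))]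
-- 	return ''.join(parts)
-- ===== Notes on version B (the rewrite author's own statement) =====
-- stated objective: simpler
-- what changed: B replaces A's single scan that flushes and clears a stack of cleared slots mid-loop with two plain phases: first parse the nonempty tokens into a list of tag-groups, then format each group i at indent i followed by the trailing blank indented lines.
import Mathlib
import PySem

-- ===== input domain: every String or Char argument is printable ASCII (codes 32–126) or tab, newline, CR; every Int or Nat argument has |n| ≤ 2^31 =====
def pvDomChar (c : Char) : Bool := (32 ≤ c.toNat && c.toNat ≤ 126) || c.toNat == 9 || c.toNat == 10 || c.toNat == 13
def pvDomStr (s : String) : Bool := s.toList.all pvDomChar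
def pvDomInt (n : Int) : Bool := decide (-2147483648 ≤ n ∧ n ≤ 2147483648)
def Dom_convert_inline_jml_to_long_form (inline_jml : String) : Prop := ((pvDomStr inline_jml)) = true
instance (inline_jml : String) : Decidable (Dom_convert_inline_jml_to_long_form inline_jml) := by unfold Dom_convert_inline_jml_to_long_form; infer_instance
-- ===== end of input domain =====

-- B separates parsing (token stream → list of tag-groups) from formatting, instead of A's
-- mid-scan flush-and-clear of a stack; objective: simpler. Proved equal on Pre_ (A raises
-- IndexError on a stray token before the first at-sign tag; B raises there too, excluded).

-- ===== PORT A =====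
-- one step of A's inner loop; state = (long_form_jml, stack); strings kept as List Char
def pvStepA (st : List Char × List (List (List Char))) (tag : List Char) :
    List Char × List (List (List Char)) :=
  if PySem.Chars.startswith tag ['@'] then
    if st.2 ≠ [] then
      (st.1 ++ List.replicate st.2.dropLast.length '\t'
           ++ PySem.Chars.join [' '] (st.2.getLastD []) ++ ['\n'],
       (st.2.dropLast ++ [[]]) ++ [[tag]])
    else (st.1, st.2 ++ [[tag]])
  else if tag ≠ [] then
    -- stack[-1].append(tag); the empty-stack IndexError is excluded by Pre_
    (st.1, st.2.dropLast ++ [st.2.getLastD [] ++ [tag]])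
  else st

-- the trailing 'while stack:' flush loop
def pvFlushA (stack : List (List (List Char))) (out : List Char) : List Char :=
  if h : stack = [] then out
  else pvFlushA stack.dropLast
        (out ++ List.replicate (stack.length - 1) '\t'
             ++ PySem.Chars.join [' '] (stack.getLastD []) ++ ['\n'])
termination_by stack.length
decreasing_by simp only [List.length_dropLast]; have := List.length_pos_of_ne_nil h; omega

def convert_inline_jml_to_long_form (inline_jml : String) : String :=
  let lines := PySem.Chars.splitOn inline_jml.toList ['\n']
  let st := lines.foldl (fun st line => (PySem.Chars.splitOn line [' ']).foldl pvStepA st) ([], [])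
  String.ofList (pvFlushA st.2 st.1)

-- ===== PORT B =====
-- phase 1: the nonempty tokens, then fold them into a list of groups
def pvTokens (s : List Char) : List (List Char) :=
  (PySem.Chars.splitOn s ['\n']).flatMap
    (fun line => (PySem.Chars.splitOn line [' ']).filter (fun t => t ≠ []))

def pvStepB (gs : List (List (List Char))) (t : List Char) : List (List (List Char)) :=
  if PySem.Chars.startswith t ['@'] then gs ++ [[t]]
  else gs.dropLast ++ [gs.getLastD [] ++ [t]]   -- groups[-1].append(t); IndexError excluded by Pre_

def convert_inline_jml_to_long_form_alt (inline_jml : String) : String :=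
  let groups := (pvTokens inline_jml.toList).foldl pvStepB []
  let parts := (PySem.List.enumerate groups).map
      (fun p => List.replicate p.1.toNat '\t' ++ PySem.Chars.join [' '] p.2 ++ ['\n'])
  let blanks := (List.range (groups.length - 1)).reverse.map
      (fun i => List.replicate i '\t' ++ ['\n'])
  String.ofList (PySem.Chars.join [] (parts ++ blanks))

-- ===== PRECONDITION & SPEC =====
-- Pre_ excludes exactly the inputs where some nonempty token precedes every at-sign tag:
-- there BOTH A and B raise IndexError (stack[-1] / groups[-1] of an empty list).
def Pre_convert_inline_jml_to_long_form (inline_jml : String) : Prop :=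
  ((pvTokens inline_jml.toList).head?.all (fun t => PySem.Chars.startswith t ['@'])) = true
instance (inline_jml : String) : Decidable (Pre_convert_inline_jml_to_long_form inline_jml) := by
  unfold Pre_convert_inline_jml_to_long_form; infer_instance

def pvWitness_convert_inline_jml_to_long_form : String := "@a b\n@c"

def Spec_convert_inline_jml_to_long_form (inline_jml : String) (out : String) : Prop :=
  out = convert_inline_jml_to_long_form_alt inline_jml
instance (inline_jml : String) (out : String) :
    Decidable (Spec_convert_inline_jml_to_long_form inline_jml out) := by
  unfold Spec_convert_inline_jml_to_long_form; infer_instance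

-- ===== CLAIM (what is proved, stated in full; the proofs are below) =====
def Claim_equal_convert_inline_jml_to_long_form : Prop :=
  ∀ (inline_jml : String), Dom_convert_inline_jml_to_long_form inline_jml →
    Pre_convert_inline_jml_to_long_form inline_jml →
    Spec_convert_inline_jml_to_long_form inline_jml (convert_inline_jml_to_long_form inline_jml)

-- ===== LEMMAS AND PROOFS =====

-- formatting of a group list starting at indent i (what B's enumerate-map joins to)
def pvFmt (i : Nat) (gs : List (List (List Char))) : List Char :=
  match gs with
  | [] => []
  | g :: r => List.replicate i '\t' ++ PySem.Chars.join [' '] g ++ ['\n'] ++ pvFmt (i + 1) r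

-- the trailing blank indented lines at depths k-1, …, 0
def pvBlanks : Nat → List Char
  | 0 => []
  | k + 1 => List.replicate k '\t' ++ ['\n'] ++ pvBlanks k

lemma pvFmt_concat (gs : List (List (List Char))) (x : List (List Char)) :
    ∀ i, pvFmt i (gs ++ [x]) =
      pvFmt i gs ++ (List.replicate (i + gs.length) '\t' ++ PySem.Chars.join [' '] x ++ ['\n']) := by
  induction gs with
  | nil => intro i; simp [pvFmt]
  | cons g r ih =>
      intro i
      simp [pvFmt, ih (i+1), Nat.add_comm, Nat.add_left_comm]

lemma pvStepA_nil (st : List Char × List (List (List Char))) : pvStepA st [] = st := by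
  simp [pvStepA, PySem.Chars.startswith]

lemma foldl_stepA_filter (ts : List (List Char)) :
    ∀ st, ts.foldl pvStepA st = (ts.filter (fun t => t ≠ [])).foldl pvStepA st := by
  induction ts with
  | nil => intro st; rfl
  | cons t ts ih =>
      intro st
      by_cases h : t = []
      · subst h; simp [List.filter, pvStepA_nil, ih]
      · simp [List.filter, h, ih]

-- the central invariant: A's state mirrors B's groups-so-far (front gs already emitted,
-- stack = one cleared slot per front group plus the open last group g)
lemma pvRel (ts : List (List Char)) (hne : ∀ t ∈ ts, t ≠ []) :
    ∀ gs (g : List (List Char)),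
      ts.foldl pvStepA (pvFmt 0 gs, List.replicate gs.length [] ++ [g]) =
        (pvFmt 0 ((ts.foldl pvStepB (gs ++ [g])).dropLast),
         List.replicate ((ts.foldl pvStepB (gs ++ [g])).dropLast).length []
           ++ [(ts.foldl pvStepB (gs ++ [g])).getLastD []]) := by
  induction ts with
  | nil => intro gs g; simp
  | cons t ts ih =>
      intro gs g
      have hts : ∀ x ∈ ts, x ≠ [] := fun x hx => hne x (List.mem_cons_of_mem _ hx)
      by_cases hat : PySem.Chars.startswith t ['@']
      · have hA : pvStepA (pvFmt 0 gs, List.replicate gs.length [] ++ [g]) t =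
            (pvFmt 0 (gs ++ [g]), List.replicate (gs ++ [g]).length [] ++ [[t]]) := by
          simp [pvStepA, hat, pvFmt_concat, List.replicate_succ']
        have hB : pvStepB (gs ++ [g]) t = (gs ++ [g]) ++ [[t]] := by
          simp [pvStepB, hat]
        simp only [List.foldl_cons, hA, hB]
        exact ih hts (gs ++ [g]) [t]
      · have ht : t ≠ [] := hne t (by simp)
        have hA : pvStepA (pvFmt 0 gs, List.replicate gs.length [] ++ [g]) t =
            (pvFmt 0 gs, List.replicate gs.length [] ++ [g ++ [t]]) := by
          simp [pvStepA, hat, ht]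
        have hB : pvStepB (gs ++ [g]) t = gs ++ [g ++ [t]] := by
          simp [pvStepB, hat]
        simp only [List.foldl_cons, hA, hB]
        exact ih hts gs (g ++ [t])

lemma pvFlushA_replicate (k : Nat) : ∀ out,
    pvFlushA (List.replicate k [] ) out = out ++ pvBlanks k := by
  induction k with
  | zero => intro out; rw [pvFlushA]; simp [pvBlanks]
  | succ k ih =>
      intro out
      rw [pvFlushA]
      simp [List.replicate_succ' (n := k), pvBlanks, ih, PySem.Chars.join_nil]

lemma pvFlushA_shape (k : Nat) (g : List (List Char)) (out : List Char) :
    pvFlushA (List.replicate k [] ++ [g]) out =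
      out ++ List.replicate k '\t' ++ PySem.Chars.join [' '] g ++ ['\n'] ++ pvBlanks k := by
  rw [pvFlushA]
  simp [pvFlushA_replicate]

lemma pvStepB_ne_nil (gs : List (List (List Char))) (t : List Char) : pvStepB gs t ≠ [] := by
  unfold pvStepB; split <;> simp

lemma foldl_stepB_ne_nil (ts : List (List Char)) :
    ∀ init, init ≠ [] → ts.foldl pvStepB init ≠ [] := by
  induction ts with
  | nil => intro init h; simpa using h
  | cons t ts ih => intro init _; exact ih _ (pvStepB_ne_nil init t)

-- B's enumerate-map-join is pvFmt
lemma pvJoin_cons (x : List Char) (l : List (List Char)) :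
    PySem.Chars.join [] (x :: l) = x ++ PySem.Chars.join [] l := by
  cases l with
  | nil => simp [PySem.Chars.join_singleton, PySem.Chars.join_nil]
  | cons y r => simp [PySem.Chars.join_cons_cons]

lemma pvJoin_append (xs ys : List (List Char)) :
    PySem.Chars.join [] (xs ++ ys) = PySem.Chars.join [] xs ++ PySem.Chars.join [] ys := by
  induction xs with
  | nil => simp [PySem.Chars.join_nil]
  | cons x xs ih => simp [pvJoin_cons, ih]

lemma pvParts_eq (gs : List (List (List Char))) : ∀ (i : Nat),
    PySem.Chars.join [] ((PySem.List.enumerate gs (i : Int)).map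
      (fun p => List.replicate p.1.toNat '\t' ++ PySem.Chars.join [' '] p.2 ++ ['\n']))
      = pvFmt i gs := by
  induction gs with
  | nil => intro i; simp [PySem.List.enumerate_nil, PySem.Chars.join_nil, pvFmt]
  | cons g r ih =>
      intro i
      rw [PySem.List.enumerate_cons]
      have : ((i : Int) + 1) = ((i + 1 : Nat) : Int) := by push_cast; ring
      simp only [List.map_cons, pvJoin_cons, this, ih (i + 1), pvFmt]
      simp

lemma pvBlanks_eq (k : Nat) :
    PySem.Chars.join [] ((List.range k).reverse.map
      (fun i => List.replicate i '\t' ++ ['\n'])) = pvBlanks k := by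
  induction k with
  | zero => simp [PySem.Chars.join_nil, pvBlanks]
  | succ k ih =>
      rw [List.range_succ]
      simp only [List.reverse_append, List.reverse_singleton, List.singleton_append,
        List.map_cons, pvJoin_cons, ih, pvBlanks]

lemma pvDropLast_getLastD {α : Type} (l : List α) (h : l ≠ []) (d : α) :
    l.dropLast ++ [l.getLastD d] = l := by
  rw [List.getLastD_eq_getLast?, List.getLast?_eq_some_getLast h]
  simp [List.dropLast_append_getLast h]

-- ===== VERDICT (by name: the statement is the Claim_ definition above) =====
theorem convert_inline_jml_to_long_form_spec : Claim_equal_convert_inline_jml_to_long_form := by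
  intro s _ hpre
  unfold Spec_convert_inline_jml_to_long_form
  unfold convert_inline_jml_to_long_form convert_inline_jml_to_long_form_alt
  rw [Pre_convert_inline_jml_to_long_form] at hpre
  -- A's nested loops = one fold over the nonempty tokens
  have hflat :
      (PySem.Chars.splitOn s.toList ['\n']).foldl
          (fun st line => (PySem.Chars.splitOn line [' ']).foldl pvStepA st) (([], []) :
            List Char × List (List (List Char))) =
        (pvTokens s.toList).foldl pvStepA ([], []) := by
    rw [← List.foldl_flatMap, pvTokens, ← List.filter_flatMap,
      ← foldl_stepA_filter]
  simp only [hflat]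
  have hne : ∀ t ∈ pvTokens s.toList, t ≠ [] := by
    intro t ht
    simp only [pvTokens, List.mem_flatMap, List.mem_filter] at ht
    obtain ⟨_, _, _, h2⟩ := ht
    simpa using h2
  cases hts : pvTokens s.toList with
  | nil =>
      simp only [hts] at *
      rw [pvFlushA]
      simp [PySem.List.enumerate_nil, PySem.Chars.join_nil]
  | cons t rest =>
      rw [hts] at hne hpre
      have hat : PySem.Chars.startswith t ['@'] = true := by simpa using hpre
      have hstep0 : pvStepA (([], []) : List Char × List (List (List Char))) t = ([], [[t]]) := by
        simp [pvStepA, hat]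
      have hstepB0 : pvStepB [] t = [[t]] := by simp [pvStepB, hat]
      have hrest : ∀ x ∈ rest, x ≠ [] := fun x hx => hne x (List.mem_cons_of_mem _ hx)
      set G := rest.foldl pvStepB [[t]] with hG
      have hGne : G ≠ [] := foldl_stepB_ne_nil rest [[t]] (by simp)
      have hrel := pvRel rest hrest [] [t]
      simp only [List.nil_append, List.length_nil, List.replicate_zero] at hrel
      simp only [List.foldl_cons, hstep0, hstepB0, ← hG] at hrel ⊢
      rw [show (pvFmt 0 [] : List Char) = [] from rfl] at hrel
      rw [hrel]
      rw [pvFlushA_shape]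
      -- both sides are pvFmt 0 G ++ pvBlanks (G.length - 1)
      have hsplit : pvFmt 0 G = pvFmt 0 G.dropLast ++
          (List.replicate (0 + G.dropLast.length) '\t'
            ++ PySem.Chars.join [' '] (G.getLastD []) ++ ['\n']) := by
        conv_lhs => rw [← pvDropLast_getLastD G hGne []]
        rw [pvFmt_concat]
      have hparts := pvParts_eq G 0
      simp only [Nat.cast_zero] at hparts
      rw [pvJoin_append, hparts, pvBlanks_eq, hsplit]
      simp [List.length_dropLast, List.append_assoc]
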